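-- pv_equiv track=rewrite | github.com/ruziniuuuuu/niukb | Code/PyAcmEnv/test.py | func
-- ===== SOURCE A (Python) =====
-- def func(W):
--     # sort
--     W.sort()
--     n = len(W)
--
--     MAX_CAP = 10
--
--     # filter bags
--     selected = set()
--     result = 0
--     for i in range(n - 1, -1, -1):
--         if i in selected:
--             continue
--         selected.add(i)
--         count = W[i]
--         for j in range(i - 1, -1, -1):
--             if j in selected:
--                 continue
--             if count + W[j] > MAX_CAP:
--                 break
--             else:
--                 count += W[j]
--                 selected.add(j)
--         result += 1
--
--     return result
-- ===== SOURCE B (Python) =====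
-- def func(W):
--     # Single descending pass with a running group sum, instead of A's nested
--     # index scans over a selected-index set. Same in-place W.sort() mutation.
--     W.sort()
--     MAX_CAP = 10
--     result = 0
--     count = None
--     for x in reversed(W):
--         if count is None or count + x > MAX_CAP:
--             result += 1
--             count = x
--         else:
--             count += x
--     return result
-- ===== Notes on version B (the rewrite author's own statement) =====
-- stated objective: simpler
-- what changed: Replaced the nested index loops over a selected-index set (outer scan plus inner consuming scan with break) by one linear descending pass over the sorted list keeping only a running group sum and a group counter.
import Mathlib
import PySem

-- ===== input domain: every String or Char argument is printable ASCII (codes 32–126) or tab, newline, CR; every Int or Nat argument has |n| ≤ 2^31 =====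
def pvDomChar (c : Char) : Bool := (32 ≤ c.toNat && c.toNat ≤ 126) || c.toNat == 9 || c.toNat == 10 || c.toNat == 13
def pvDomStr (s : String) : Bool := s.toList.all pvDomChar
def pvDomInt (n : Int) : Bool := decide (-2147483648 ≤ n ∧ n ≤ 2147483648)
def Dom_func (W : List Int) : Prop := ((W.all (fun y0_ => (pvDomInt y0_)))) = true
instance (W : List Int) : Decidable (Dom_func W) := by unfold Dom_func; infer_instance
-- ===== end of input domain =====

-- B replaces A's nested index scans over a selected-index set by one linear descending
-- pass keeping a running group sum (objective: simpler). Both Pythons sort W in place;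
-- the equivalence proved here is about the return value.

-- ===== PORT A =====
-- inner 'for j in range(i-1,-1,-1)' loop of A, with its break (returns updated set and count)
def innerA (Ws : List Int) (js : List Int) (selected : PySem.Set Int) (count : Int) :
    PySem.Set Int × Int :=
  match js with
  | [] => (selected, count)
  | j :: rest =>
    if PySem.Set.contains selected j then innerA Ws rest selected count
    else if count + PySem.List.pyGetD Ws j 0 > 10 then (selected, count)
    else innerA Ws rest (PySem.Set.add selected j) (count + PySem.List.pyGetD Ws j 0)

-- body of A's outer 'for i in range(n-1,-1,-1)' loop; state = (selected, result)
def stepA (Ws : List Int) (st : PySem.Set Int × Int) (i : Int) : PySem.Set Int × Int :=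
  if PySem.Set.contains st.1 i then st
  else
    let selected := PySem.Set.add st.1 i
    let count := PySem.List.pyGetD Ws i 0   -- W[i]; the index is provably in range
    let inner := innerA Ws (PySem.List.pyRange (i - 1) (-1) (-1)) selected count
    (inner.1, st.2 + 1)

def func (W : List Int) : Int :=
  let Ws := PySem.List.sorted W (fun x => x) false
  let n : Int := Ws.length
  -- MAX_CAP = 10 is inlined at its single use inside innerA
  ((PySem.List.pyRange (n - 1) (-1) (-1)).foldl (stepA Ws) (PySem.Set.empty, 0)).2

-- ===== PORT B =====
-- body of B's single 'for x in reversed(W)' loop; state = (result, count), count = none before the first group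
def stepB (st : Int × Option Int) (x : Int) : Int × Option Int :=
  match st.2 with
  | none => (st.1 + 1, some x)
  | some c => if c + x > 10 then (st.1 + 1, some x) else (st.1, some (c + x))

def func_alt (W : List Int) : Int :=
  let Ws := PySem.List.sorted W (fun x => x) false
  (Ws.reverse.foldl stepB (0, none)).1

-- ===== PRECONDITION & SPEC =====
def Spec_func (W : List Int) (out : Int) : Prop := out = func_alt W
instance (W : List Int) (out : Int) : Decidable (Spec_func W out) := by unfold Spec_func; infer_instance

-- ===== CLAIM (what is proved, stated in full; the proofs are below) =====
def Claim_equal_func : Prop := ∀ (W : List Int), Dom_func W → Spec_func W (func W)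

-- ===== LEMMAS AND PROOFS =====

-- elements a group with running sum c absorbs from the descending list: what remains
def consume (c : Int) : List Int → List Int
  | [] => []
  | x :: xs => if c + x > 10 then x :: xs else consume (c + x) xs

theorem consume_length_le (c : Int) (l : List Int) : (consume c l).length ≤ l.length := by
  induction l generalizing c with
  | nil => simp [consume]
  | cons x xs ih =>
    simp only [consume]
    split
    · simp
    · exact Nat.le_succ_of_le (ih _)

-- number of groups the greedy descending grouping forms
def countGroups : List Int → Int
  | [] => 0
  | x :: xs => countGroups (consume x xs) + 1
termination_by l => l.length
decreasing_by simpa [Nat.lt_succ_iff] using consume_length_le x xs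

theorem countGroups_nil : countGroups [] = 0 := by rw [countGroups]

theorem countGroups_cons (x : Int) (xs : List Int) :
    countGroups (x :: xs) = countGroups (consume x xs) + 1 := by rw [countGroups]

-- descList Ws k = the first k elements of Ws, largest-index first: what A has not yet selected
def descList (Ws : List Int) (k : Nat) : List Int := (Ws.take k).reverse

theorem descList_zero (Ws : List Int) : descList Ws 0 = [] := by simp [descList]

theorem descList_succ (Ws : List Int) (k : Nat) (hk : k < Ws.length) :
    descList Ws (k + 1) = Ws[k] :: descList Ws k := by
  rw [descList, descList, List.take_add_one, List.getElem?_eq_getElem hk]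
  simp

theorem contains_add (S : PySem.Set Int) (x j : Int) :
    PySem.Set.contains (PySem.Set.add S x) j = (PySem.Set.contains S j || decide (j = x)) := by
  rw [Bool.eq_iff_iff]
  simp [PySem.Set.mem_add, PySem.Set.contains]

theorem contains_empty (j : Int) : PySem.Set.contains (PySem.Set.empty) j = false := by
  simp [PySem.Set.contains, PySem.Set.empty]

theorem pyGetD_getElem (Ws : List Int) (k : Nat) (hk : k < Ws.length) :
    PySem.List.pyGetD Ws (k : Int) 0 = Ws[k] := by
  rw [PySem.List.pyGetD_natCast, List.getD_eq_getElem?_getD, List.getElem?_eq_getElem hk]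
  rfl

-- A's inner loop: with selected = {i..n-1}, it consumes a prefix of descList i into the
-- current group, leaving selected = {m..n-1} where descList m = consume count (descList i)
theorem innerA_spec (Ws : List Int) (i : Nat) (hi : i ≤ Ws.length)
    (S : PySem.Set Int) (c : Int)
    (hS : ∀ j : Int, PySem.Set.contains S j = decide ((i : Int) ≤ j ∧ j < Ws.length)) :
    ∃ m : Nat, m ≤ i ∧
      (∀ j : Int, PySem.Set.contains (innerA Ws (PySem.List.pyRange ((i : Int) - 1) (-1) (-1)) S c).1 j
          = decide ((m : Int) ≤ j ∧ j < Ws.length)) ∧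
      consume c (descList Ws i) = descList Ws m := by
  induction i generalizing S c with
  | zero =>
    rw [PySem.List.pyRange_neg_one_eq_nil (by norm_num)]
    exact ⟨0, le_refl _, by simpa [innerA] using hS, by simp [consume, descList]⟩
  | succ k ih =>
    have hk : k < Ws.length := hi
    have hcast : ((k + 1 : Nat) : Int) - 1 = (k : Nat) := by push_cast; ring
    rw [hcast, PySem.List.pyRange_neg_one_cons (by omega)]
    have hSk : PySem.Set.contains S (k : Int) = false := by
      rw [hS]; simp only [decide_eq_false_iff_not]; omega
    rw [innerA, hSk]
    simp only [Bool.false_eq_true, if_false]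
    rw [pyGetD_getElem Ws k hk]
    by_cases hbr : c + Ws[k] > 10
    · rw [if_pos hbr]
      refine ⟨k + 1, le_refl _, hS, ?_⟩
      rw [descList_succ Ws k hk, consume, if_pos hbr]
    · rw [if_neg hbr]
      have hS' : ∀ j : Int, PySem.Set.contains (PySem.Set.add S (k : Int)) j
          = decide ((k : Int) ≤ j ∧ j < Ws.length) := by
        intro j
        rw [contains_add, hS]
        rw [Bool.eq_iff_iff]
        simp only [Bool.or_eq_true, decide_eq_true_eq]
        omega
      obtain ⟨m, hm, hmem, hcons⟩ := ih (Nat.le_of_succ_le hi) (PySem.Set.add S (k : Int)) (c + Ws[k]) hS'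
      refine ⟨m, Nat.le_succ_of_le hm, hmem, ?_⟩
      rw [descList_succ Ws k hk, consume, if_neg hbr, hcons]

-- already-selected indices at the top of the remaining range are skipped without effect
theorem skip_spec (Ws : List Int) (i m : Nat) (hmi : m ≤ i) (hi : i ≤ Ws.length)
    (S : PySem.Set Int) (res : Int)
    (hS : ∀ j : Int, PySem.Set.contains S j = decide ((m : Int) ≤ j ∧ j < Ws.length)) :
    (PySem.List.pyRange ((i : Int) - 1) (-1) (-1)).foldl (stepA Ws) (S, res)
      = (PySem.List.pyRange ((m : Int) - 1) (-1) (-1)).foldl (stepA Ws) (S, res) := by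
  induction i with
  | zero => rw [Nat.le_zero.mp hmi]
  | succ k ih =>
    rcases Nat.eq_or_lt_of_le hmi with h | h
    · rw [h]
    · have hmk : m ≤ k := Nat.lt_succ_iff.mp h
      have hcast : ((k + 1 : Nat) : Int) - 1 = (k : Nat) := by push_cast; ring
      rw [hcast, PySem.List.pyRange_neg_one_cons (by omega)]
      have hsel : PySem.Set.contains S (k : Int) = true := by
        rw [hS]; simp only [decide_eq_true_eq]; omega
      rw [List.foldl_cons]
      have : stepA Ws (S, res) (k : Int) = (S, res) := by
        rw [stepA, hsel]; simp
      rw [this]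
      exact ih hmk (Nat.le_of_succ_le hi)

-- A's outer loop counts exactly the greedy descending groups of the unselected part
theorem outer_spec (Ws : List Int) (i : Nat) (hi : i ≤ Ws.length) (S : PySem.Set Int) (res : Int)
    (hS : ∀ j : Int, PySem.Set.contains S j = decide ((i : Int) ≤ j ∧ j < Ws.length)) :
    ((PySem.List.pyRange ((i : Int) - 1) (-1) (-1)).foldl (stepA Ws) (S, res)).2
      = res + countGroups (descList Ws i) := by
  induction i using Nat.strong_induction_on generalizing S res with
  | _ i IH =>
    match i, hi with
    | 0, _ =>
      rw [PySem.List.pyRange_neg_one_eq_nil (by norm_num)]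
      simp [descList_zero, countGroups_nil]
    | (k + 1), hi =>
      have hk : k < Ws.length := hi
      have hcast : ((k + 1 : Nat) : Int) - 1 = (k : Nat) := by push_cast; ring
      rw [hcast, PySem.List.pyRange_neg_one_cons (by omega)]
      have hSk : PySem.Set.contains S (k : Int) = false := by
        rw [hS]; simp only [decide_eq_false_iff_not]; omega
      rw [List.foldl_cons]
      have hS' : ∀ j : Int, PySem.Set.contains (PySem.Set.add S (k : Int)) j
          = decide ((k : Int) ≤ j ∧ j < Ws.length) := by
        intro j
        rw [contains_add, hS]
        rw [Bool.eq_iff_iff]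
        simp only [Bool.or_eq_true, decide_eq_true_eq]
        omega
      obtain ⟨m, hm, hmem, hcons⟩ :=
        innerA_spec Ws k (Nat.le_of_succ_le hi) (PySem.Set.add S (k : Int))
          (PySem.List.pyGetD Ws (k : Int) 0) hS'
      have hstep : stepA Ws (S, res) (k : Int)
          = ((innerA Ws (PySem.List.pyRange ((k : Int) - 1) (-1) (-1))
                (PySem.Set.add S (k : Int)) (PySem.List.pyGetD Ws (k : Int) 0)).1, res + 1) := by
        rw [stepA, hSk]; simp
      rw [hstep,
          skip_spec Ws k m hm (Nat.le_of_succ_le hi) _ (res + 1) hmem,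
          IH m (by omega) (by omega) _ (res + 1) hmem]
      rw [descList_succ Ws k hk, countGroups_cons, ← pyGetD_getElem Ws k hk, hcons]
      ring

-- B's loop with an open group of running sum c counts the remaining groups
theorem foldB_spec (L : List Int) (res c : Int) :
    ((L.foldl stepB (res, some c)).1) = res + countGroups (consume c L) := by
  induction L generalizing res c with
  | nil => simp [consume, countGroups_nil]
  | cons x rest ih =>
    rw [List.foldl_cons, stepB]
    by_cases hbr : c + x > 10
    · simp only [if_pos hbr]
      rw [ih, consume, if_pos hbr, countGroups_cons]
      ring
    · simp only [if_neg hbr]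
      rw [ih, consume, if_neg hbr]

theorem func_eq_countGroups (W : List Int) :
    func W = countGroups (PySem.List.sorted W (fun x => x) false).reverse := by
  show ((PySem.List.pyRange
      (((PySem.List.sorted W (fun x => x) false).length : Int) - 1) (-1) (-1)).foldl
      (stepA (PySem.List.sorted W (fun x => x) false)) (PySem.Set.empty, 0)).2 = _
  have h := outer_spec (PySem.List.sorted W (fun x => x) false)
    (PySem.List.sorted W (fun x => x) false).length (le_refl _) PySem.Set.empty 0
    (by intro j; rw [contains_empty]; symm; simp only [decide_eq_false_iff_not]; omega)
  rw [h, descList, List.take_length, zero_add]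

theorem func_alt_eq_countGroups (W : List Int) :
    func_alt W = countGroups (PySem.List.sorted W (fun x => x) false).reverse := by
  show ((PySem.List.sorted W (fun x => x) false).reverse.foldl stepB (0, none)).1 = _
  cases h : (PySem.List.sorted W (fun x => x) false).reverse with
  | nil => simp [countGroups_nil]
  | cons x rest =>
    rw [List.foldl_cons]
    have hstep : stepB (0, none) x = (0 + 1, some x) := rfl
    rw [hstep, foldB_spec, countGroups_cons]
    ring

-- ===== VERDICT (by name: the statement is the Claim_ definition above) =====
theorem func_spec : Claim_equal_func := by
  intro W _
  unfold Spec_func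
  rw [func_eq_countGroups, func_alt_eq_countGroups]
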